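-- pv_equiv track=rewrite | github.com/menickname/waafle | waafle_v1.0/count_events_method_RB.py | count_each_lvl
-- ===== SOURCE A (Python) =====
-- def count_each_lvl( bugname, count, dict_genes ):
--     for i in range( len( bugname.split('|') ) ):
--         buglvl = '|'.join( bugname.split('|')[:i+1] )
--         if buglvl in dict_genes.keys():
--             dict_genes[ buglvl ] = dict_genes[ buglvl ] + count
--         else:
--             dict_genes[ buglvl ] = count
--     return dict_genes
-- ===== SOURCE B (Python) =====
-- def count_each_lvl(bugname, count, dict_genes):
--     parts = bugname.split('|')
--     prefix = parts[0]
--     dict_genes[prefix] = dict_genes.get(prefix, 0) + count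
--     for p in parts[1:]:
--         prefix = prefix + '|' + p
--         dict_genes[prefix] = dict_genes.get(prefix, 0) + count
--     return dict_genes
-- ===== Notes on version B (the rewrite author's own statement) =====
-- stated objective: alternative
-- what changed: B splits the name once and extends a running prefix string per level with a dict get, instead of A's re-splitting the name and re-joining the whole prefix at every level.
import Mathlib
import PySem

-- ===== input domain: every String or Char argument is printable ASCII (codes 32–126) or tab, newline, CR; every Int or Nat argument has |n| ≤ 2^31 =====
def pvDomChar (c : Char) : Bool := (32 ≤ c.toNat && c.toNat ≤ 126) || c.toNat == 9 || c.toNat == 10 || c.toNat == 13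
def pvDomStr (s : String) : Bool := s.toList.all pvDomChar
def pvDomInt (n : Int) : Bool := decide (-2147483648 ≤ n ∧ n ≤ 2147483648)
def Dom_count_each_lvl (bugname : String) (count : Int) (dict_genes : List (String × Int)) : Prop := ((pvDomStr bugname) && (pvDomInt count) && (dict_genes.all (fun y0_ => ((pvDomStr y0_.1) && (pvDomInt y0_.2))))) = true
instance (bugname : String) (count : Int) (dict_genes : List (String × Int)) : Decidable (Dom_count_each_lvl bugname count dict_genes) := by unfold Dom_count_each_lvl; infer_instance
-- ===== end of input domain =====

-- B splits once and extends a running prefix string via dict.get, instead of A's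
-- re-splitting and re-joining per level (objective: alternative). A mutates dict_genes
-- in place in Python and B performs the same mutation; the equivalence is about the
-- returned dict.

-- ===== PORT A =====
def count_each_lvl (bugname : String) (count : Int) (dict_genes : List (String × Int)) : List (String × Int) :=
  let d0 := PySem.Dict.ofList dict_genes
  -- 'bugname.split('|')': sep is the non-empty literal "|", so split? never raises; .getD [] only totalizes
  ((PySem.List.pyRange 0 (((PySem.Str.split? bugname "|").getD []).length : Int) 1).foldl
    (fun d i =>
      let buglvl := PySem.Str.join "|" (PySem.List.slice ((PySem.Str.split? bugname "|").getD []) none (some (i + 1)))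
      if d.contains buglvl then d.insert buglvl (d.getD buglvl 0 + count)
      else d.insert buglvl count) d0).items

-- ===== PORT B =====
-- the 'for p in parts[1:]' loop of Source B, carrying the running prefix
def celLoop (count : Int) : List String → String → PySem.Dict String Int → PySem.Dict String Int
  | [], _, d => d
  | q :: qs, pre, d =>
      let pre' := pre ++ "|" ++ q
      celLoop count qs pre' (d.insert pre' (d.getD pre' 0 + count))

def count_each_lvl_alt (bugname : String) (count : Int) (dict_genes : List (String × Int)) : List (String × Int) :=
  let d0 := PySem.Dict.ofList dict_genes
  (match (PySem.Str.split? bugname "|").getD [] with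
   | [] => d0   -- unreachable: str.split never returns an empty list
   | p :: rest => celLoop count rest p (d0.insert p (d0.getD p 0 + count))).items

-- ===== PRECONDITION & SPEC =====
def Spec_count_each_lvl (bugname : String) (count : Int) (dict_genes : List (String × Int)) (out : List (String × Int)) : Prop := out = count_each_lvl_alt bugname count dict_genes
instance (bugname : String) (count : Int) (dict_genes : List (String × Int)) (out : List (String × Int)) : Decidable (Spec_count_each_lvl bugname count dict_genes out) := by unfold Spec_count_each_lvl; infer_instance

-- ===== CLAIM (what is proved, stated in full; the proofs are below) =====
def Claim_equal_count_each_lvl : Prop := ∀ (bugname : String) (count : Int) (dict_genes : List (String × Int)), Dom_count_each_lvl bugname count dict_genes → Spec_count_each_lvl bugname count dict_genes (count_each_lvl bugname count dict_genes)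

-- ===== LEMMAS AND PROOFS =====

-- join of the nonempty prefixes of parts, built incrementally (proof-only helper)
def prefJoins : List String → List String
  | [] => []
  | p :: rest => p :: (prefJoins rest).map (fun s => p ++ "|" ++ s)

-- B's per-key update
def stepB (count : Int) (d : PySem.Dict String Int) (k : String) : PySem.Dict String Int :=
  d.insert k (d.getD k 0 + count)

-- A's per-key update equals B's
theorem stepA_eq_stepB (count : Int) (d : PySem.Dict String Int) (k : String) :
    (if d.contains k then d.insert k (d.getD k 0 + count) else d.insert k count)
      = stepB count d k := by
  unfold stepB
  by_cases h : d.contains k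
  · simp [h]
  · rw [if_neg (by simp [h]), PySem.Dict.getD_of_not_contains _ _ (by simp [h]), zero_add]

theorem join_cons_of_ne_nil (p : String) (l : List String) (h : l ≠ []) :
    PySem.Str.join "|" (p :: l) = p ++ "|" ++ PySem.Str.join "|" l := by
  cases l with
  | nil => exact absurd rfl h
  | cons q t =>
    apply String.toList_inj.mp
    simp only [PySem.Str.toList_join, List.map_cons, PySem.Chars.join_cons_cons,
      String.toList_append]

theorem join_singleton_str (p : String) : PySem.Str.join "|" [p] = p := by
  apply String.toList_inj.mp
  simp [PySem.Str.toList_join, PySem.Chars.join_singleton]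

-- celLoop is a foldl of stepB over the keys it generates
theorem celLoop_eq_foldl (count : Int) (qs : List String) (pre : String)
    (d : PySem.Dict String Int) :
    celLoop count qs pre d = ((prefJoins qs).map (fun s => pre ++ "|" ++ s)).foldl (stepB count) d := by
  induction qs generalizing pre d with
  | nil => rfl
  | cons q qs ih =>
    show celLoop count qs (pre ++ "|" ++ q) (stepB count d (pre ++ "|" ++ q)) = _
    rw [ih]
    simp [prefJoins, List.map_map, Function.comp_def, String.append_assoc]

-- joining '|'-prefixes: join "|" (parts.take (k+1)) enumerates prefJoins parts
theorem prefJoins_eq_map_range (parts : List String) :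
    prefJoins parts
      = (List.range parts.length).map (fun k => PySem.Str.join "|" (parts.take (k + 1))) := by
  induction parts with
  | nil => rfl
  | cons p rest ih =>
    simp only [prefJoins, List.length_cons, List.range_succ_eq_map, List.map_cons,
      List.take_succ_cons, List.take_zero, join_singleton_str, List.map_map]
    refine congrArg (p :: ·) ?_
    rw [ih, List.map_map]
    refine List.map_congr_left fun k hk => ?_
    have hk' : k < rest.length := List.mem_range.mp hk
    have hne : rest.take (k + 1) ≠ [] := by
      intro h
      rcases List.take_eq_nil_iff.mp h with h' | h'
      · omega
      · subst h'; simp at hk'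
    simp only [Function.comp_def, Nat.succ_eq_add_one, join_cons_of_ne_nil p _ hne]

theorem ports_agree (count : Int) (parts : List String) (d0 : PySem.Dict String Int) :
    (PySem.List.pyRange 0 (parts.length : Int) 1).foldl
      (fun d i =>
        let buglvl := PySem.Str.join "|" (PySem.List.slice parts none (some (i + 1)))
        if d.contains buglvl then d.insert buglvl (d.getD buglvl 0 + count)
        else d.insert buglvl count) d0
      = (match parts with
         | [] => d0
         | p :: rest => celLoop count rest p (d0.insert p (d0.getD p 0 + count))) := by
  have hA : (PySem.List.pyRange 0 (parts.length : Int) 1).foldl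
      (fun d i =>
        let buglvl := PySem.Str.join "|" (PySem.List.slice parts none (some (i + 1)))
        if d.contains buglvl then d.insert buglvl (d.getD buglvl 0 + count)
        else d.insert buglvl count) d0
      = (prefJoins parts).foldl (stepB count) d0 := by
    rw [PySem.List.pyRange_zero_nat, List.foldl_map, prefJoins_eq_map_range, List.foldl_map]
    refine PySem.List.foldl_congr_mem _ _ _ _ fun d k _ => ?_
    have h1 : ((k : Int) + 1) = ((k + 1 : Nat) : Int) := by push_cast; ring
    show _ = stepB count d (PySem.Str.join "|" (parts.take (k + 1)))
    rw [h1, PySem.List.slice_to_natCast, stepA_eq_stepB]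
  rw [hA]
  cases parts with
  | nil => rfl
  | cons p rest =>
    show (prefJoins (p :: rest)).foldl (stepB count) d0
        = celLoop count rest p (stepB count d0 p)
    rw [celLoop_eq_foldl]
    rfl

-- ===== VERDICT (by name: the statement is the Claim_ definition above) =====
theorem count_each_lvl_spec : Claim_equal_count_each_lvl := by
  intro bugname count dict_genes _
  show count_each_lvl bugname count dict_genes = count_each_lvl_alt bugname count dict_genes
  exact congrArg PySem.Dict.items
    (ports_agree count ((PySem.Str.split? bugname "|").getD []) (PySem.Dict.ofList dict_genes))
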